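-- pv_equiv track=rewrite | github.com/Ssebi1/Advent-of-code | Day 3/day_3.py | get_numbers_from_input
-- ===== SOURCE A (Python) =====
-- def get_numbers_from_input(input):
--     numbers = []
--     characters = ['/', '\\', '|', '-', '+', '-', '_', '*', '#', '@', '!',
--                   '?', '>', '<', '^', 'v', '(', ')', '[', ']', '{', '}',
--                   ':', ';', ',', '~', '.', '`', '$', '%', '&', '=', '"']
--     for line in input:
--         for char in characters:
--             line = line.replace(char, ' ')
--         line = line.split()
--         numbers.append([int(x) for x in line if x != '' and x != ' '])
--     return numbers
-- ===== SOURCE B (Python) =====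
-- SYMBOLS = '/\\|-+-_*#@!?><^v()[]{}:;,~.`$%&="'
--
-- def _line_numbers(line):
--     nums = []
--     cur = []
--     for c in line:
--         if c in SYMBOLS or c.isspace():
--             if cur:
--                 nums.append(int(''.join(cur)))
--                 cur = []
--         else:
--             cur.append(c)
--     if cur:
--         nums.append(int(''.join(cur)))
--     return nums
--
-- def get_numbers_from_input(input):
--     return [_line_numbers(line) for line in input]
-- ===== Notes on version B (the rewrite author's own statement) =====
-- stated objective: alternative
-- what changed: A makes 33 sequential str.replace passes over each line, then splits on whitespace and converts tokens; B tokenizes each line in a single left-to-right character scan that accumulates maximal runs of non-separator (symbol or whitespace) characters and converts each run with int().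
import Mathlib
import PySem

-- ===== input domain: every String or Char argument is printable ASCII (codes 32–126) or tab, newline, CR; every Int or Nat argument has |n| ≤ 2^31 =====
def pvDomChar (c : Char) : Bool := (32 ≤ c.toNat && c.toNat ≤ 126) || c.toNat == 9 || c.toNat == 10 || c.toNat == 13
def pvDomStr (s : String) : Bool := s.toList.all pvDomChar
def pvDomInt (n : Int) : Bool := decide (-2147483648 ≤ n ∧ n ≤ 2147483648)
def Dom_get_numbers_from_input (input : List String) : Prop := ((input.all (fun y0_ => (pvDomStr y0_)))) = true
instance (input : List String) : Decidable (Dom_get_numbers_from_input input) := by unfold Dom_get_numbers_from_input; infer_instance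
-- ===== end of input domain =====

-- B replaces A's 33 sequential str.replace passes + split() by a single one-pass
-- character scanner that accumulates maximal runs of non-separator characters
-- and converts each run with int(); same return value (objective: alternative).


-- ===== PORT A =====
def pvACharacters : List String :=
  ["/", "\\", "|", "-", "+", "-", "_", "*", "#", "@", "!",
   "?", ">", "<", "^", "v", "(", ")", "[", "]", "{", "}",
   ":", ";", ",", "~", ".", "`", "$", "%", "&", "=", "\""]
-- the body of A's 'for line in input' loop
def pvALine (line : String) : List Int :=
  let line2 := pvACharacters.foldl (fun l ch => PySem.Str.replace l ch " ") line
  let parts := PySem.Str.split₀ line2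
  -- int(x) raises ValueError on a non-int token; Pre_ excludes that, the port uses getD 0 there
  (parts.filter (fun x => !(x == "") && !(x == " "))).map (fun x => (PySem.Int.ofStr? x).getD 0)
def get_numbers_from_input (input : List String) : List (List Int) :=
  input.foldl (fun numbers line => numbers ++ [pvALine line]) []

-- ===== PORT B =====
-- Source B's SYMBOLS string, as its character list
def pvSymChars : List Char := "/\\|-+-_*#@!?><^v()[]{}:;,~.`$%&=\"".toList
-- 'c in SYMBOLS or c.isspace()': single-char substring membership is list membership (exact)
def pvIsSep (c : Char) : Bool := pvSymChars.contains c || PySem.Chars.isspace c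
-- _line_numbers: one pass over the line, cur = the current run of non-separator chars
def pvLineNums : List Char → List Char → List Int → List Int
  | [], cur, nums => if cur.isEmpty then nums else nums ++ [(PySem.Int.ofChars? cur).getD 0]
  | c :: rest, cur, nums =>
      if pvIsSep c then
        if cur.isEmpty then pvLineNums rest [] nums
        else pvLineNums rest [] (nums ++ [(PySem.Int.ofChars? cur).getD 0])
      else pvLineNums rest (cur ++ [c]) nums

def get_numbers_from_input_alt (input : List String) : List (List Int) :=
  input.map (fun line => pvLineNums line.toList [] [])

-- ===== PRECONDITION & SPEC =====
-- Pre_ excludes exactly the inputs where Python's int() raises ValueError: some token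
-- (maximal run of non-separator characters) of some line is not a valid int literal.
def Pre_get_numbers_from_input (input : List String) : Prop :=
  (input.all (fun line =>
    ((line.toList.splitOnP
        (fun c => "/\\|-+-_*#@!?><^v()[]{}:;,~.`$%&=\"".toList.contains c
                    || PySem.Chars.isspace c)).filter (fun t => !t.isEmpty)).all
      (fun t => (PySem.Int.ofChars? t).isSome))) = true
instance (input : List String) : Decidable (Pre_get_numbers_from_input input) := by
  unfold Pre_get_numbers_from_input; infer_instance
def pvWitness_get_numbers_from_input : List String := ["12 + 34", "#5 v 007", ""]

def Spec_get_numbers_from_input (input : List String) (out : List (List Int)) : Prop := out = get_numbers_from_input_alt input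
instance (input : List String) (out : List (List Int)) : Decidable (Spec_get_numbers_from_input input out) := by unfold Spec_get_numbers_from_input; infer_instance

-- ===== CLAIM (what is proved, stated in full; the proofs are below) =====
def Claim_equal_get_numbers_from_input : Prop := ∀ (input : List String), Dom_get_numbers_from_input input → Pre_get_numbers_from_input input → Spec_get_numbers_from_input input (get_numbers_from_input input)

-- ===== LEMMAS AND PROOFS =====

-- the combined effect of A's 33 replace passes on one character
def pvSubst (c : Char) : Char := if pvSymChars.contains c then ' ' else c

-- the token lists (maximal non-separator runs), shared shape of both sides
def pvToks : List Char → List Char → List (List Char)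
  | [], cur => if cur.isEmpty then [] else [cur]
  | c :: rest, cur =>
      if pvIsSep c then
        if cur.isEmpty then pvToks rest [] else cur :: pvToks rest []
      else pvToks rest (cur ++ [c])

theorem pv_repl_go (o : Char) :
    ∀ (l acc : List Char),
      PySem.Chars.replace.go [o] [' '] l.length l acc
        = acc.reverse ++ l.map (fun c => if c == o then ' ' else c) := by
  intro l
  induction l with
  | nil => intro acc; simp [PySem.Chars.replace.go]
  | cons c t ih =>
      intro acc
      show PySem.Chars.replace.go [o] [' '] (t.length + 1) (c :: t) acc = _
      rw [PySem.Chars.replace.go]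
      by_cases h : o = c
      · subst h
        simp only [List.isPrefixOf_cons₂, BEq.rfl, List.isPrefixOf_nil_left]
        simpa using ih (' ' :: acc)
      · have hb : ([o].isPrefixOf (c :: t)) = false := by
          simp [List.isPrefixOf_cons₂, h]
        have hb2 : (c == o) = false := by simp [Ne.symm h]
        simp only [hb, Bool.false_eq_true, if_false]
        rw [ih (c :: acc)]
        simp only [List.reverse_cons, List.append_assoc, List.singleton_append, List.map_cons, hb2,
          Bool.false_eq_true, if_false]

theorem pv_repl_single (o : Char) (cs : List Char) :
    PySem.Chars.replace cs [o] [' '] = cs.map (fun c => if c == o then ' ' else c) := by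
  have : ([o] : List Char).isEmpty = false := rfl
  simp only [PySem.Chars.replace, this, Bool.false_eq_true, if_false]
  simpa using pv_repl_go o cs []

theorem pv_fold_repl :
    ∀ (S : List Char), ' ' ∉ S → ∀ (cs : List Char),
      S.foldl (fun l o => PySem.Chars.replace l [o] [' ']) cs
        = cs.map (fun c => if S.contains c then ' ' else c) := by
  intro S
  induction S with
  | nil => intro _ cs; simp
  | cons o S ih =>
      intro hsp cs
      have hspS : ' ' ∉ S := fun h => hsp (List.mem_cons_of_mem _ h)
      have hspo : (' ' == o) = false := by
        simp only [beq_eq_false_iff_ne, ne_eq]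
        intro h; exact hsp (h ▸ List.mem_cons_self)
      simp only [List.foldl_cons]
      rw [pv_repl_single, ih hspS, List.map_map]
      have hS' : S.contains ' ' = false := by
        simpa [List.contains_eq_mem] using hspS
      refine List.map_congr_left (fun c _ => ?_)
      simp only [Function.comp]
      by_cases h : (c == o) = true
      · simp only [h, if_pos, List.contains_cons, Bool.true_or, hS']
        rfl
      · have hne : ¬ c = o := by simpa using h
        simp [h, hne]

-- A's per-line replace fold, moved to the Chars level
theorem pv_fold_repl_str :
    ∀ (L : List String) (s : String),
      (L.foldl (fun l ch => PySem.Str.replace l ch " ") s).toList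
        = L.foldl (fun l t => PySem.Chars.replace l t.toList [' ']) s.toList := by
  intro L
  induction L with
  | nil => intro s; rfl
  | cons ch L ih =>
      intro s
      simp only [List.foldl_cons]
      rw [ih (PySem.Str.replace s ch " "), PySem.Str.toList_replace]
      have hsp : (" " : String).toList = [' '] := by decide
      rw [hsp]

theorem pv_line_map (s : String) :
    (pvACharacters.foldl (fun l ch => PySem.Str.replace l ch " ") s).toList
      = s.toList.map pvSubst := by
  rw [pv_fold_repl_str]
  have h1 : pvACharacters.map String.toList = pvSymChars.map (fun c => [c]) := by rfl
  have h2 : ' ' ∉ pvSymChars := by decide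
  calc pvACharacters.foldl (fun l t => PySem.Chars.replace l t.toList [' ']) s.toList
      = (pvACharacters.map String.toList).foldl
          (fun l t => PySem.Chars.replace l t [' ']) s.toList := by
        rw [List.foldl_map]
    _ = pvSymChars.foldl (fun l o => PySem.Chars.replace l [o] [' ']) s.toList := by
        rw [h1, List.foldl_map]
    _ = s.toList.map pvSubst := by
        rw [pv_fold_repl _ h2]; rfl

theorem pv_isspace_subst (c : Char) : PySem.Chars.isspace (pvSubst c) = pvIsSep c := by
  unfold pvSubst pvIsSep
  have hsp : PySem.Chars.isspace ' ' = true := by decide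
  by_cases h : pvSymChars.contains c = true
  · simp [List.contains_eq_mem] at h
    simp [h, hsp, List.contains_eq_mem]
  · simp only [Bool.not_eq_true] at h
    have h' : c ∉ pvSymChars := by simpa [List.contains_eq_mem] using h
    simp [h']

theorem pv_subst_of_not_sep {c : Char} (h : pvIsSep c = false) : pvSubst c = c := by
  unfold pvSubst
  have h1 : pvSymChars.contains c = false := by
    unfold pvIsSep at h
    exact (Bool.or_eq_false_iff.mp h).1
  have h2 : c ∉ pvSymChars := by simpa [List.contains_eq_mem] using h1
  simp [h2]

theorem pv_split_go_toks :
    ∀ (cs cur : List Char) (accL : List (List Char)),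
      PySem.Chars.split₀.go (cs.map pvSubst) cur accL
        = accL.reverse ++ pvToks cs cur.reverse := by
  intro cs
  induction cs with
  | nil =>
      intro cur accL
      simp only [List.map_nil, PySem.Chars.split₀.go, pvToks]
      by_cases h : cur.isEmpty
      · simp [h]
      · simp only [h, Bool.false_eq_true, if_false, List.reverse_cons]
        simp [h]
  | cons c rest ih =>
      intro cur accL
      simp only [List.map_cons, PySem.Chars.split₀.go, pv_isspace_subst c]
      by_cases hs : pvIsSep c = true
      · simp only [hs, if_pos, pvToks]
        by_cases hc : cur.isEmpty
        · simpa [hc] using ih [] accL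
        · simp only [hc, Bool.false_eq_true, if_false]
          rw [ih [] (cur.reverse :: accL)]
          simp [hc]
      · have hs' : pvIsSep c = false := by simpa using hs
        simp only [hs', Bool.false_eq_true, if_false, pvToks, pv_subst_of_not_sep hs']
        rw [ih (c :: cur) accL]
        simp

theorem pv_toks_good :
    ∀ (cs cur : List Char), cur.all (fun c => !pvIsSep c) = true →
      ∀ t ∈ pvToks cs cur, t ≠ [] ∧ t.all (fun c => !pvIsSep c) = true := by
  intro cs
  induction cs with
  | nil =>
      intro cur hcur t ht
      simp only [pvToks] at ht
      by_cases h : cur.isEmpty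
      · simp [h] at ht
      · simp only [h, Bool.false_eq_true, if_false, List.mem_singleton] at ht
        subst ht
        exact ⟨by simpa [List.isEmpty_iff] using h, hcur⟩
  | cons c rest ih =>
      intro cur hcur t ht
      simp only [pvToks] at ht
      by_cases hs : pvIsSep c = true
      · simp only [hs, if_pos] at ht
        by_cases hc : cur.isEmpty
        · simp only [hc, if_pos] at ht
          exact ih [] (by simp) t ht
        · simp only [hc, Bool.false_eq_true, if_false, List.mem_cons] at ht
          rcases ht with rfl | ht
          · exact ⟨by simpa [List.isEmpty_iff] using hc, hcur⟩
          · exact ih [] (by simp) t ht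
      · simp only [hs, Bool.false_eq_true, if_false] at ht
        refine ih (cur ++ [c]) ?_ t ht
        simp [List.all_append, hcur, hs]

theorem pv_lineNums_toks :
    ∀ (cs cur : List Char) (nums : List Int),
      pvLineNums cs cur nums
        = nums ++ (pvToks cs cur).map (fun t => (PySem.Int.ofChars? t).getD 0) := by
  intro cs
  induction cs with
  | nil =>
      intro cur nums
      simp only [pvLineNums, pvToks]
      by_cases h : cur.isEmpty <;> simp [h]
  | cons c rest ih =>
      intro cur nums
      simp only [pvLineNums, pvToks]
      by_cases hs : pvIsSep c = true
      · simp only [hs, if_pos]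
        by_cases hc : cur.isEmpty
        · simp [hc, ih]
        · simp [hc, ih]
      · simp [hs, ih]

-- A's per-line value equals B's per-line value
theorem pv_perline (line : String) :
    pvALine line = pvLineNums line.toList [] [] := by
  unfold pvALine
  show ((PySem.Str.split₀
      (pvACharacters.foldl (fun l ch => PySem.Str.replace l ch " ") line)).filter
      (fun x => !(x == "") && !(x == " "))).map (fun x => (PySem.Int.ofStr? x).getD 0)
    = pvLineNums line.toList [] []
  set parts := PySem.Str.split₀
      (pvACharacters.foldl (fun l ch => PySem.Str.replace l ch " ") line) with hparts
  have hmap : parts.map String.toList = pvToks line.toList [] := by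
    rw [hparts, PySem.Str.split₀_map_toList, pv_line_map]
    show PySem.Chars.split₀.go (line.toList.map pvSubst) [] [] = _
    simpa using pv_split_go_toks line.toList [] []
  have hgood : ∀ p ∈ parts, p ≠ "" ∧ p ≠ " " := by
    intro p hp
    have hmem : p.toList ∈ pvToks line.toList [] := by
      rw [← hmap]; exact List.mem_map_of_mem hp
    obtain ⟨hne, hall⟩ := pv_toks_good line.toList [] (by simp) p.toList hmem
    constructor
    · intro h; subst h; exact hne rfl
    · intro h; subst h
      have : pvIsSep ' ' = true := by decide
      simp [this] at hall
  have hfilt : parts.filter (fun x => !(x == "") && !(x == " ")) = parts := by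
    apply List.filter_eq_self.mpr
    intro p hp
    obtain ⟨h1, h2⟩ := hgood p hp
    simp [h1, h2]
  rw [hfilt, pv_lineNums_toks, List.nil_append, ← hmap, List.map_map]
  refine List.map_congr_left (fun p _ => ?_)
  simp [PySem.Int.ofStr?, Function.comp]

-- ===== VERDICT (by name: the statement is the Claim_ definition above) =====
theorem get_numbers_from_input_spec : Claim_equal_get_numbers_from_input := by
  intro input _ _
  show get_numbers_from_input input = get_numbers_from_input_alt input
  unfold get_numbers_from_input get_numbers_from_input_alt
  rw [PySem.List.foldl_append_singleton_eq_map pvALine input [], List.nil_append]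
  exact List.map_congr_left (fun line _ => pv_perline line)
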